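-- pv_equiv track=rewrite | github.com/runtimeverification/polkadot-verification | mergeRules.py | rule_seq_follow_count
-- ===== SOURCE A (Python) =====
-- def rule_seq_follow_count(rule_seq, rule_traces):
--     rule_follow = { }
--     len_seq = len(rule_seq)
--     for rule_trace in rule_traces:
--         for i in range(len(rule_trace) - len_seq):
--             if rule_trace[i:i + len_seq] == rule_seq:
--                 next_rule = rule_trace[i + len_seq]
--                 if next_rule not in rule_follow:
--                     rule_follow[next_rule] = 1
--                 else:
--                     rule_follow[next_rule] = rule_follow[next_rule] + 1
--     return rule_follow
-- ===== SOURCE B (Python) =====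
-- def rule_seq_follow_count(rule_seq, rule_traces):
--     counts = {}
--     k = len(rule_seq)
--     if k == 0:
--         # empty pattern matches before every element: count every element
--         for trace in rule_traces:
--             for x in trace:
--                 counts[x] = counts.get(x, 0) + 1
--         return counts
--     # KMP failure function
--     fail = [0] * k
--     j = 0
--     for i in range(1, k):
--         while j > 0 and rule_seq[i] != rule_seq[j]:
--             j = fail[j - 1]
--         if rule_seq[i] == rule_seq[j]:
--             j += 1
--         fail[i] = j
--     # linear scan of each trace
--     for trace in rule_traces:
--         state = 0
--         for idx, x in enumerate(trace):
--             while state > 0 and x != rule_seq[state]: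
--                 state = fail[state - 1]
--             if x == rule_seq[state]:
--                 state += 1
--             if state == k:
--                 if idx + 1 < len(trace):
--                     nxt = trace[idx + 1]
--                     counts[nxt] = counts.get(nxt, 0) + 1
--                 state = fail[k - 1]
--     return counts
-- ===== Notes on version B (the rewrite author's own statement) =====
-- stated objective: alternative
-- what changed: A compares a length-k slice against the pattern at every start position of every trace; B is Knuth-Morris-Pratt: it precomputes the pattern's failure function once and scans each trace in a single linear pass carrying a match-length state, counting the element after each completed match.
import Mathlib
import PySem

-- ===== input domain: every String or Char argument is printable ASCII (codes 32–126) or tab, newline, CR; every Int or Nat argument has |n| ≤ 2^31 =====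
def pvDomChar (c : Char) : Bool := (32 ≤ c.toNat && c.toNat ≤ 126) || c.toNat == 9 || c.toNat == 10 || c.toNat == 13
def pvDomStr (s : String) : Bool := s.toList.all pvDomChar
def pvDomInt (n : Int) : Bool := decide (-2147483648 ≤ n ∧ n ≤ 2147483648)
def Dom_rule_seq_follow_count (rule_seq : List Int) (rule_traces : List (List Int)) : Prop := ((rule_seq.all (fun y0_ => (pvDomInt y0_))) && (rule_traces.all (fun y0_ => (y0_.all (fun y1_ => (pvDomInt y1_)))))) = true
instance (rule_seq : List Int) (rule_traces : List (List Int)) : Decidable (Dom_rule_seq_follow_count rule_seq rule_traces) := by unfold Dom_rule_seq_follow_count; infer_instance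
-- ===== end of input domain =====

-- B replaces A's per-position slice comparison by Knuth–Morris–Pratt matching: it precomputes the
-- pattern's failure function once and scans each trace left to right in a single pass carrying a
-- match-length state, counting the element after each complete match (objective: alternative).

-- ===== PORT A =====
def rule_seq_follow_count (rule_seq : List Int) (rule_traces : List (List Int)) : List (Int × Int) :=
  let len_seq := PySem.List.len rule_seq
  (rule_traces.foldl
    (fun rule_follow rule_trace =>
      (PySem.List.pyRange 0 (PySem.List.len rule_trace - len_seq) 1).foldl
        (fun rule_follow i =>
          if PySem.List.slice rule_trace (some i) (some (i + len_seq)) == rule_seq then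
            let next_rule := PySem.List.pyGetD rule_trace (i + len_seq) 0
            match rule_follow.get? next_rule with
            | none => rule_follow.insert next_rule 1
            | some v => rule_follow.insert next_rule (v + 1)
          else rule_follow)
        rule_follow)
    PySem.Dict.empty).items

-- ===== PORT B =====
-- Source B's inner `while state > 0 and x != rule_seq[state]: state = fail[state-1]`;
-- the `min … s` only witnesses termination (fail[s] ≤ s for the fail table B builds).
def pvWhile (p : List Int) (fail : List Nat) (c : Int) : Nat → Nat
  | 0 => 0
  | s + 1 => if c == p.getD (s + 1) 0 then s + 1 else pvWhile p fail c (min (fail.getD s 0) s)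
decreasing_by exact Nat.lt_succ_of_le (Nat.min_le_right _ _)

-- the while loop followed by `if x == rule_seq[state]: state += 1`
def pvStep (p : List Int) (fail : List Nat) (c : Int) (s : Nat) : Nat :=
  let r := pvWhile p fail c s
  if c == p.getD r 0 then r + 1 else r

-- Source B's failure-function loop `for i in range(1, k)`: the chars rule_seq[1:], building fail left to right
def pvBuildFail (p : List Int) : List Nat :=
  ((p.drop 1).foldl
    (fun (acc : List Nat × Nat) c =>
      let j := pvStep p acc.1 c acc.2
      (acc.1 ++ [j], j))
    ([0], 0)).1

-- Source B's scan `for idx, x in enumerate(trace)`; trace[idx+1] (guarded by idx+1 < len) is the head of rest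
def pvScan (p : List Int) (fail : List Nat) (k : Nat) : List Int → Nat → PySem.Dict Int Int → PySem.Dict Int Int
  | [], _, counts => counts
  | x :: rest, state, counts =>
    let s' := pvStep p fail x state
    if s' == k then
      let counts' := match rest with
        | [] => counts
        | y :: _ => counts.insert y (counts.getD y 0 + 1)
      pvScan p fail k rest (fail.getD (k - 1) 0) counts'
    else pvScan p fail k rest s' counts

def rule_seq_follow_count_alt (rule_seq : List Int) (rule_traces : List (List Int)) : List (Int × Int) :=
  let k := rule_seq.length
  if k == 0 then
    (rule_traces.foldl
      (fun counts trace => trace.foldl (fun counts x => counts.insert x (counts.getD x 0 + 1)) counts)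
      PySem.Dict.empty).items
  else
    let fail := pvBuildFail rule_seq
    (rule_traces.foldl (fun counts trace => pvScan rule_seq fail k trace 0 counts) PySem.Dict.empty).items

-- ===== PRECONDITION & SPEC =====
def Spec_rule_seq_follow_count (rule_seq : List Int) (rule_traces : List (List Int)) (out : List (Int × Int)) : Prop := out = rule_seq_follow_count_alt rule_seq rule_traces
instance (rule_seq : List Int) (rule_traces : List (List Int)) (out : List (Int × Int)) : Decidable (Spec_rule_seq_follow_count rule_seq rule_traces out) := by unfold Spec_rule_seq_follow_count; infer_instance

-- ===== CLAIM (what is proved, stated in full; the proofs are below) =====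
def Claim_equal_rule_seq_follow_count : Prop := ∀ (rule_seq : List Int) (rule_traces : List (List Int)), Dom_rule_seq_follow_count rule_seq rule_traces → Spec_rule_seq_follow_count rule_seq rule_traces (rule_seq_follow_count rule_seq rule_traces)

-- ===== LEMMAS AND PROOFS =====

-- the counting step shared by both programs
def pvBump (d : PySem.Dict Int Int) (x : Int) : PySem.Dict Int Int := d.insert x (d.getD x 0 + 1)

-- longest border of p.take m: the greatest l < m with p.take l a suffix of p.take m
def pvBord (p : List Int) (m : Nat) : Nat :=
  Nat.findGreatest (fun l => l < m ∧ p.take l <:+ p.take m) m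

-- longest prefix of p (shorter than p) that is a suffix of u: the scanner's state invariant
def pvMB (p u : List Int) : Nat :=
  Nat.findGreatest (fun l => l < p.length ∧ p.take l <:+ u) p.length

-- the "next" elements B emits while scanning rest, having already read u
def pvSpecNexts (p : List Int) : List Int → List Int → List Int
  | _, [] => []
  | u, x :: rest =>
    (if p <:+ u ++ [x] then rest.take 1 else []) ++ pvSpecNexts p (u ++ [x]) rest

lemma pv_match_eq_bump (d : PySem.Dict Int Int) (x : Int) :
    (match d.get? x with
     | none => d.insert x 1
     | some v => d.insert x (v + 1)) = pvBump d x := by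
  cases h : d.get? x <;>
    simp [pvBump, PySem.Dict.getD_eq_get?_getD, h]


lemma pv_suffix_snoc_iff (a u : List Int) (c x : Int) :
    a ++ [c] <:+ u ++ [x] ↔ c = x ∧ a <:+ u := by
  rw [← List.reverse_prefix, List.reverse_append, List.reverse_append]
  simp only [List.reverse_singleton, List.singleton_append, List.cons_prefix_cons,
    List.reverse_prefix]

lemma pv_findGreatest_congr (P Q : Nat → Prop) [DecidablePred P] [DecidablePred Q]
    (n : Nat) (h : ∀ l, l ≤ n → (P l ↔ Q l)) :
    Nat.findGreatest P n = Nat.findGreatest Q n := by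
  induction n with
  | zero => rfl
  | succ n ih =>
    rw [Nat.findGreatest_succ, Nat.findGreatest_succ, ih (fun l hl => h l (Nat.le_succ_of_le hl))]
    by_cases hp : P (n+1)
    · rw [if_pos hp, if_pos ((h (n+1) le_rfl).mp hp)]
    · rw [if_neg hp, if_neg (fun hq => hp ((h (n+1) le_rfl).mpr hq))]

lemma pv_bord_spec (p : List Int) (m : Nat) (hm : 1 ≤ m) :
    pvBord p m < m ∧ p.take (pvBord p m) <:+ p.take m := by
  have h0 : (fun l => l < m ∧ p.take l <:+ p.take m) 0 := ⟨hm, by simp⟩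
  unfold pvBord
  exact Nat.findGreatest_spec (P := fun l => l < m ∧ p.take l <:+ p.take m) (Nat.zero_le m) h0

lemma pv_bord_lt (p : List Int) (m : Nat) (hm : 1 ≤ m) : pvBord p m < m :=
  (pv_bord_spec p m hm).1

lemma pv_bord_suffix (p : List Int) (m : Nat) (hm : 1 ≤ m) :
    p.take (pvBord p m) <:+ p.take m :=
  (pv_bord_spec p m hm).2

lemma pv_bord_greatest (p : List Int) (m l : Nat) (h1 : l < m) (h2 : p.take l <:+ p.take m) :
    l ≤ pvBord p m := by
  have hP : (fun l => l < m ∧ p.take l <:+ p.take m) l := ⟨h1, h2⟩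
  unfold pvBord
  exact Nat.le_findGreatest (P := fun l => l < m ∧ p.take l <:+ p.take m) (Nat.le_of_lt h1) hP

lemma pv_MB_spec (p u : List Int) (hk : 1 ≤ p.length) :
    pvMB p u < p.length ∧ p.take (pvMB p u) <:+ u := by
  have h0 : (fun l => l < p.length ∧ p.take l <:+ u) 0 := ⟨hk, by simp⟩
  unfold pvMB
  exact Nat.findGreatest_spec (P := fun l => l < p.length ∧ p.take l <:+ u) (Nat.zero_le _) h0

lemma pv_MB_lt (p u : List Int) (hk : 1 ≤ p.length) : pvMB p u < p.length :=
  (pv_MB_spec p u hk).1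

lemma pv_MB_suffix (p u : List Int) (hk : 1 ≤ p.length) : p.take (pvMB p u) <:+ u :=
  (pv_MB_spec p u hk).2

lemma pv_MB_greatest (p u : List Int) (l : Nat) (h1 : l < p.length) (h2 : p.take l <:+ u) :
    l ≤ pvMB p u := by
  have hP : (fun l => l < p.length ∧ p.take l <:+ u) l := ⟨h1, h2⟩
  unfold pvMB
  exact Nat.le_findGreatest (P := fun l => l < p.length ∧ p.take l <:+ u) (Nat.le_of_lt h1) hP

lemma pv_MB_nil (p : List Int) (_hk : 1 ≤ p.length) : pvMB p [] = 0 := by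
  rw [pvMB, Nat.findGreatest_eq_iff]
  refine ⟨Nat.zero_le _, fun h => absurd rfl h, fun l hl _ hP => ?_⟩
  have h2 := hP.2
  rw [List.suffix_nil] at h2
  have : l = 0 := by
    have := congrArg List.length h2
    simp [Nat.min_eq_left (Nat.le_of_lt hP.1)] at this
    omega
  omega

-- strip the last element of a match: p.take l <:+ u ++ [c] with 1 ≤ l ≤ p.length
lemma pv_strip (p u : List Int) (c : Int) (l : Nat) (hl : 1 ≤ l) (hlk : l ≤ p.length)
    (h : p.take l <:+ u ++ [c]) : p[l-1]'(by omega) = c ∧ p.take (l-1) <:+ u := by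
  have ht : p.take l = p.take (l-1) ++ [p[l-1]'(by omega)] := by
    have := List.take_succ_eq_append_getElem (l := p) (i := l-1) (by omega)
    rw [← this]; congr 1; omega
  rw [ht, pv_suffix_snoc_iff] at h
  exact h

lemma pvStep_of_beq (p : List Int) (fail : List Nat) (c : Int) (s : Nat)
    (h : (c == p.getD s 0) = true) : pvStep p fail c s = s + 1 := by
  cases s with
  | zero =>
    have h' : c = p[(0:Nat)]?.getD 0 := by simpa using h
    simp only [pvStep, pvWhile]
    simp [h']
  | succ t =>
    have h' : c = p[t+1]?.getD 0 := by simpa using h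
    simp only [pvStep, pvWhile]
    simp [h']

lemma pvStep_zero_miss (p : List Int) (fail : List Nat) (c : Int)
    (h : ¬ (c == p.getD 0 0) = true) : pvStep p fail c 0 = 0 := by
  have h' : ¬ c = p[(0:Nat)]?.getD 0 := by simpa using h
  simp only [pvStep, pvWhile]
  simp [h']

lemma pvStep_miss (p : List Int) (fail : List Nat) (c : Int) (t : Nat)
    (h : ¬ (c == p.getD (t+1) 0) = true) :
    pvStep p fail c (t+1) = pvStep p fail c (min (fail.getD t 0) t) := by
  have h' : ¬ c = p[t+1]?.getD 0 := by simpa using h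
  conv_lhs => rw [pvStep, pvWhile]
  rw [pvStep]
  simp [h']

lemma pv_step_spec (p : List Int) (fail : List Nat) (c : Int) (u : List Int) (m : Nat)
    (hm : m ≤ p.length) :
    ∀ s, (∀ r, r < s → fail.getD r 0 = pvBord p (r+1)) →
      p.take s <:+ u → s < p.length → s < m →
      (∀ l, 1 ≤ l → l ≤ m → p.take l <:+ u ++ [c] → l - 1 ≤ s) →
      pvStep p fail c s = Nat.findGreatest (fun l => p.take l <:+ u ++ [c]) m := by
  intro s
  induction s using Nat.strong_induction_on with
  | _ s IH =>
    intro hfail h1 h2 h3 h4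
    by_cases hc : (c == p.getD s 0) = true
    · rw [pvStep_of_beq p fail c s hc]
      have hcc : c = p[s]'h2 := by
        rw [beq_iff_eq] at hc; rw [hc, List.getD_eq_getElem]
      symm
      rw [Nat.findGreatest_eq_iff]
      refine ⟨by omega, fun _ => ?_, fun l hl1 hl2 hPl => ?_⟩
      · rw [List.take_succ_eq_append_getElem h2]
        exact (pv_suffix_snoc_iff _ _ _ _).mpr ⟨hcc.symm, h1⟩
      · have := h4 l (by omega) hl2 hPl; omega
    · cases s with
      | zero =>
        rw [pvStep_zero_miss p fail c hc]
        symm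
        rw [Nat.findGreatest_eq_iff]
        refine ⟨Nat.zero_le _, fun h => absurd rfl h, fun l hl1 hl2 hPl => ?_⟩
        have h4l := h4 l (by omega) hl2 hPl
        have hl : l = 1 := by omega
        subst hl
        have hstrip := pv_strip p u c 1 le_rfl (by omega) hPl
        apply hc
        rw [beq_iff_eq, List.getD_eq_getElem]
        exact hstrip.1.symm
      | succ t =>
        have hft : fail.getD t 0 = pvBord p (t+1) := hfail t (by omega)
        have hblt : pvBord p (t+1) < t+1 := pv_bord_lt p (t+1) (by omega)
        have hmin : min (fail.getD t 0) t = pvBord p (t+1) := by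
          rw [hft]; exact Nat.min_eq_left (by omega)
        rw [pvStep_miss p fail c t hc, hmin]
        apply IH (pvBord p (t+1)) (by omega)
        · intro r hr; exact hfail r (by omega)
        · exact (pv_bord_suffix p (t+1) (by omega)).trans h1
        · omega
        · omega
        · intro l hl1 hl2 hPl
          have h4l := h4 l hl1 hl2 hPl
          have hstrip := pv_strip p u c l hl1 (by omega) hPl
          have hne : l - 1 ≠ t + 1 := by
            intro he
            apply hc
            rw [beq_iff_eq, List.getD_eq_getElem]
            have := hstrip.1
            rw [← this]
            congr 1
            omega
          have hsu : p.take (l-1) <:+ p.take (t+1) :=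
            List.suffix_of_suffix_length_le hstrip.2 h1
              (by simp [List.length_take]; omega)
          exact pv_bord_greatest p (t+1) (l-1) (by omega) hsu

lemma pv_bord_one (p : List Int) : pvBord p 1 = 0 :=
  Nat.lt_one_iff.mp (pv_bord_lt p 1 le_rfl)

lemma pv_build_inv (p : List Int) (hk : 1 ≤ p.length) :
    ∀ i, i ≤ p.length - 1 →
      ((p.drop 1).take i).foldl
        (fun (acc : List Nat × Nat) c => let j := pvStep p acc.1 c acc.2; (acc.1 ++ [j], j))
        ([0], 0)
      = ((List.range (i+1)).map (fun r => pvBord p (r+1)), pvBord p (i+1)) := by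
  intro i
  induction i with
  | zero =>
    intro _
    simp [pv_bord_one]
  | succ i ih =>
    intro hi
    have hi' : i < (p.drop 1).length := by simp; omega
    have hip : i + 1 < p.length := by omega
    have hstep : (p.drop 1).take (i+1) = (p.drop 1).take i ++ [p[i+1]'hip] := by
      rw [List.take_succ_eq_append_getElem (by omega)]
      congr 1
      simp
    rw [hstep, List.foldl_concat, ih (by omega)]
    simp only []
    have hspec := pv_step_spec p ((List.range (i+1)).map (fun r => pvBord p (r+1)))
        (p[i+1]'hip) (p.take (i+1)) (i+1) (by omega) (pvBord p (i+1))
        (fun r hr => by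
          rw [PySem.List.getD_map_range _ _ _ _ (by
            have := pv_bord_lt p (i+1) (by omega); omega)])
        (pv_bord_suffix p (i+1) (by omega))
        (by have := pv_bord_lt p (i+1) (by omega); omega)
        (pv_bord_lt p (i+1) (by omega))
        (fun l hl1 hl2 hPl => by
          have hstrip := pv_strip p (p.take (i+1)) (p[i+1]'hip) l hl1 (by omega) hPl
          exact pv_bord_greatest p (i+1) (l-1) (by omega) hstrip.2)
    have htake : p.take (i+1) ++ [p[i+1]'hip] = p.take (i+2) := by
      rw [List.take_succ_eq_append_getElem hip]
    have hN : Nat.findGreatest (fun l => p.take l <:+ p.take (i+1) ++ [p[i+1]'hip]) (i+1)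
        = pvBord p (i+2) := by
      rw [htake]
      have hb : pvBord p (i+2)
          = Nat.findGreatest (fun l => l < i+2 ∧ p.take l <:+ p.take (i+2)) (i+1) := by
        rw [pvBord, Nat.findGreatest_succ, if_neg (fun h => absurd h.1 (by omega))]
      rw [hb]
      exact pv_findGreatest_congr _ _ (i+1)
        (fun l _ => ⟨fun h => ⟨by omega, h⟩, fun h => h.2⟩)
    rw [hspec, hN]
    simp [List.range_succ]

lemma pv_fail_getD (p : List Int) (hk : 1 ≤ p.length) :
    ∀ r, r < p.length → (pvBuildFail p).getD r 0 = pvBord p (r+1) := by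
  intro r hr
  have hdrop : (p.drop 1).take (p.length - 1) = p.drop 1 := by
    apply List.take_of_length_le; simp
  have := pv_build_inv p hk (p.length - 1) le_rfl
  rw [hdrop] at this
  rw [pvBuildFail, this]
  simp only []
  rw [PySem.List.getD_map_range _ _ _ _ (by omega)]

lemma pv_MB_full (p u' : List Int) (hk : 1 ≤ p.length) (hfull : p <:+ u') :
    pvMB p u' = pvBord p p.length := by
  apply le_antisymm
  · have hlt := pv_MB_lt p u' hk
    have hsuf := pv_MB_suffix p u' hk
    have hsp : p.take (pvMB p u') <:+ p := by
      apply List.suffix_of_suffix_length_le hsuf hfull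
      simp
    exact pv_bord_greatest p p.length (pvMB p u') hlt (by simpa using hsp)
  · refine pv_MB_greatest p u' (pvBord p p.length) (pv_bord_lt p p.length hk) ?_
    exact (pv_bord_suffix p p.length hk).trans (by simpa using hfull)

lemma pv_scan_eq (p : List Int) (fail : List Nat) (hk : 1 ≤ p.length)
    (hfail : ∀ r, r < p.length → fail.getD r 0 = pvBord p (r+1)) :
    ∀ (rest u : List Int) (counts : PySem.Dict Int Int),
      pvScan p fail p.length rest (pvMB p u) counts
        = (pvSpecNexts p u rest).foldl pvBump counts := by
  intro rest
  induction rest with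
  | nil => intro u counts; rfl
  | cons x rest ih =>
    intro u counts
    have hs' : pvStep p fail x (pvMB p u)
        = Nat.findGreatest (fun l => p.take l <:+ u ++ [x]) p.length := by
      apply pv_step_spec p fail x u p.length le_rfl (pvMB p u)
      · intro r hr; exact hfail r (by have := pv_MB_lt p u hk; omega)
      · exact pv_MB_suffix p u hk
      · exact pv_MB_lt p u hk
      · exact pv_MB_lt p u hk
      · intro l hl1 hl2 hPl
        have hstrip := pv_strip p u x l hl1 hl2 hPl
        exact pv_MB_greatest p u (l-1) (by omega) hstrip.2
    have hNsuf : p.take (Nat.findGreatest (fun l => p.take l <:+ u ++ [x]) p.length) <:+ u ++ [x] := by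
      have h0 : (fun l => p.take l <:+ u ++ [x]) 0 := by simp
      exact Nat.findGreatest_spec (P := fun l => p.take l <:+ u ++ [x]) (Nat.zero_le _) h0
    by_cases hfull : p <:+ u ++ [x]
    · have hNk : Nat.findGreatest (fun l => p.take l <:+ u ++ [x]) p.length = p.length := by
        apply le_antisymm (Nat.findGreatest_le _)
        exact Nat.le_findGreatest (P := fun l => p.take l <:+ u ++ [x]) le_rfl
          (by simpa using hfull)
      have hreset : fail.getD (p.length - 1) 0 = pvMB p (u ++ [x]) := by
        rw [hfail (p.length - 1) (by omega), Nat.sub_add_cancel hk, pv_MB_full p (u ++ [x]) hk hfull]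
      simp only [pvScan]
      rw [hs', hNk, if_pos (by simp), hreset, ih]
      simp only [pvSpecNexts, if_pos hfull]
      rw [List.foldl_append]
      cases rest with
      | nil => rfl
      | cons y rest2 => rfl
    · have hNlt : Nat.findGreatest (fun l => p.take l <:+ u ++ [x]) p.length < p.length := by
        rcases Nat.lt_or_ge (Nat.findGreatest (fun l => p.take l <:+ u ++ [x]) p.length) p.length with h | h
        · exact h
        · exfalso
          have heq : Nat.findGreatest (fun l => p.take l <:+ u ++ [x]) p.length = p.length :=
            le_antisymm (Nat.findGreatest_le _) h
          rw [heq, List.take_length] at hNsuf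
          exact hfull hNsuf
      have hNMB : Nat.findGreatest (fun l => p.take l <:+ u ++ [x]) p.length = pvMB p (u ++ [x]) := by
        apply le_antisymm
        · exact pv_MB_greatest p (u ++ [x]) _ hNlt hNsuf
        · exact Nat.le_findGreatest (P := fun l => p.take l <:+ u ++ [x])
            (Nat.le_of_lt (pv_MB_lt p (u ++ [x]) hk)) (pv_MB_suffix p (u ++ [x]) hk)
      simp only [pvScan]
      rw [hs', if_neg (by simp; omega), hNMB, ih]
      simp only [pvSpecNexts, if_neg hfull, List.nil_append]

lemma pv_getD_append (u l : List Int) (n : Nat) :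
    (u ++ l).getD (u.length + n) 0 = l.getD n 0 := by
  rw [List.getD_eq_getElem?_getD, List.getD_eq_getElem?_getD,
    List.getElem?_append_right (by omega)]
  congr 2
  omega

lemma pv_specNexts_eq (p : List Int) : ∀ (rest u : List Int),
    pvSpecNexts p u rest
      = ((List.range' (u.length + 1) (rest.length - 1)).filter
          (fun e => decide (p <:+ (u ++ rest).take e))).map (fun e => (u ++ rest).getD e 0) := by
  intro rest
  induction rest with
  | nil => intro u; simp [pvSpecNexts]
  | cons x rest ih =>
    intro u
    cases rest with
    | nil => simp [pvSpecNexts]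
    | cons y rest2 =>
      have hlen : (x :: y :: rest2).length - 1 = ((y :: rest2).length - 1) + 1 := by simp
      rw [hlen, List.range'_succ, List.filter_cons]
      have htake : (u ++ x :: y :: rest2).take (u.length + 1) = u ++ [x] := by
        have := List.take_length_add_append (l₁ := u) (l₂ := (x :: y :: rest2 : List Int)) 1
        simp at this
        exact this
      have hw : (u ++ [x]) ++ (y :: rest2) = u ++ x :: y :: rest2 := by simp
      have hget : (u ++ x :: y :: rest2).getD (u.length + 1) 0 = y := by
        rw [pv_getD_append u (x :: y :: rest2) 1]
        rfl
      have ihx := ih (u ++ [x])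
      rw [hw] at ihx
      simp only [List.length_append, List.length_singleton] at ihx
      rw [pvSpecNexts, ihx]
      by_cases hc : p <:+ u ++ [x]
      · rw [if_pos hc, if_pos (by rw [htake]; exact decide_eq_true hc), List.map_cons, hget]
        show [y] ++ _ = y :: _
        rw [List.singleton_append, List.cons.injEq]
        refine ⟨rfl, ?_⟩
        congr 2
      · rw [if_neg hc, if_neg (by rw [htake]; simpa using hc), List.nil_append]

-- A's inner index loop over one trace, as a fold of the bump over the matched "next" elements
lemma pv_innerA (p t : List Int) (d : PySem.Dict Int Int) :
    (PySem.List.pyRange 0 (PySem.List.len t - PySem.List.len p) 1).foldl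
      (fun rule_follow i =>
        if PySem.List.slice t (some i) (some (i + PySem.List.len p)) == p then
          match rule_follow.get? (PySem.List.pyGetD t (i + PySem.List.len p) 0) with
          | none => rule_follow.insert (PySem.List.pyGetD t (i + PySem.List.len p) 0) 1
          | some v => rule_follow.insert (PySem.List.pyGetD t (i + PySem.List.len p) 0) (v + 1)
        else rule_follow) d
    = (((PySem.List.pyRange 0 (PySem.List.len t - PySem.List.len p) 1).filter
          (fun i => PySem.List.slice t (some i) (some (i + PySem.List.len p)) == p)).map
        (fun i => PySem.List.pyGetD t (i + PySem.List.len p) 0)).foldl pvBump d := by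
  rw [List.foldl_map, ← PySem.List.foldl_if_eq_foldl_filter]
  apply PySem.List.foldl_congr_mem
  intro acc i _
  by_cases h : (PySem.List.slice t (some i) (some (i + PySem.List.len p)) == p) = true
  · rw [if_pos h, if_pos h]
    exact pv_match_eq_bump acc _
  · rw [if_neg h, if_neg h]

-- the slice test at start j is the suffix test at end j+k
lemma pv_cond_eq (p t : List Int) (j : Nat) (hjk : j + p.length ≤ t.length) :
    (PySem.List.slice t (some (j:Int)) (some ((j:Int) + (p.length:Int))) == p)
      = decide (p <:+ t.take (j + p.length)) := by
  rw [PySem.List.slice_natCast_add]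
  apply Bool.eq_iff_iff.mpr
  rw [beq_iff_eq, decide_eq_true_iff]
  rw [List.suffix_iff_eq_drop]
  have hlen : (t.take (j + p.length)).length - p.length = j := by
    rw [List.length_take]; omega
  have hdt : (t.take (j + p.length)).drop j = (t.drop j).take p.length := by
    rw [List.drop_take]; congr 1; omega
  rw [hlen, hdt]
  exact ⟨fun h => h.symm, fun h => h.symm⟩

-- A's matched-"next" list in trace coordinates (k ≥ 1)
lemma pv_LA_eq (p t : List Int) (hk : 1 ≤ p.length) :
    ((PySem.List.pyRange 0 (PySem.List.len t - PySem.List.len p) 1).filter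
        (fun i => PySem.List.slice t (some i) (some (i + PySem.List.len p)) == p)).map
      (fun i => PySem.List.pyGetD t (i + PySem.List.len p) 0)
    = ((List.range' 1 (t.length - 1)).filter (fun e => decide (p <:+ t.take e))).map
        (fun e => t.getD e 0) := by
  have hlenp : PySem.List.len p = (p.length : Int) := PySem.List.len_eq p
  have hlent : PySem.List.len t = (t.length : Int) := PySem.List.len_eq t
  rw [hlenp, hlent, PySem.List.pyRange_one, List.filter_map, List.map_map]
  have htonat : ((t.length : Int) - (p.length : Int) - 0).toNat = t.length - p.length := by omega
  rw [htonat]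
  by_cases hkn : p.length ≤ t.length
  · -- split the end positions [1, n-1] at k
    have hsplit : List.range' 1 (t.length - 1)
        = List.range' 1 (p.length - 1) ++ List.range' p.length (t.length - p.length) := by
      have := List.range'_append_1 (s := 1) (m := p.length - 1) (n := t.length - p.length)
      rw [show 1 + (p.length - 1) = p.length by omega] at this
      rw [show p.length - 1 + (t.length - p.length) = t.length - 1 by omega] at this
      exact this.symm
    rw [hsplit, List.filter_append, List.map_append]
    have hnil : (List.range' 1 (p.length - 1)).filter (fun e => decide (p <:+ t.take e)) = [] := by
      rw [List.filter_eq_nil_iff]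
      intro e he
      rw [List.mem_range'] at he
      simp only [decide_eq_true_eq]
      intro hsuf
      have hle := hsuf.length_le
      rw [List.length_take] at hle
      omega
    rw [hnil, List.map_nil, List.nil_append, List.range'_eq_map_range, List.filter_map,
      List.map_map]
    have hcond : ∀ j ∈ List.range (t.length - p.length),
        ((fun i => PySem.List.slice t (some i) (some (i + (p.length:Int))) == p) ∘
          (fun k : Nat => (0:Int) + (k:Int))) j
        = ((fun e => decide (p <:+ t.take e)) ∘ (fun x => p.length + x)) j := by
      intro j hj
      rw [List.mem_range] at hj
      simp only [Function.comp_apply]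
      have h0 : (0:Int) + (j:Int) = (j:Int) := by ring
      rw [h0, pv_cond_eq p t j (by omega), Nat.add_comm j p.length]
    rw [List.filter_congr hcond]
    apply List.map_congr_left
    intro j hj
    rw [List.mem_filter, List.mem_range] at hj
    simp only [Function.comp_apply]
    have h0 : (0:Int) + (j:Int) + (p.length:Int) = ((j + p.length : Nat) : Int) := by push_cast; ring
    rw [h0, PySem.List.pyGetD_natCast, Nat.add_comm j p.length]
  · -- pattern longer than the trace: both sides empty
    have h1 : t.length - p.length = 0 := by omega
    rw [h1]
    simp only [List.range_zero, List.map_nil, List.filter_nil]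
    symm
    rw [List.map_eq_nil_iff, List.filter_eq_nil_iff]
    intro e he
    rw [List.mem_range'] at he
    simp only [decide_eq_true_eq]
    intro hsuf
    have hle := hsuf.length_le
    rw [List.length_take] at hle
    omega

-- with the empty pattern A's loop bumps every element of the trace
lemma pv_LA_zero (t : List Int) :
    ((PySem.List.pyRange 0 (PySem.List.len t - PySem.List.len ([] : List Int)) 1).filter
        (fun i => PySem.List.slice t (some i) (some (i + PySem.List.len ([] : List Int))) == ([] : List Int))).map
      (fun i => PySem.List.pyGetD t (i + PySem.List.len ([] : List Int)) 0)
    = t := by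
  have hlen0 : PySem.List.len ([] : List Int) = 0 := rfl
  rw [hlen0]
  have hcond : ∀ i ∈ PySem.List.pyRange 0 (PySem.List.len t - 0) 1,
      (PySem.List.slice t (some i) (some (i + 0)) == ([] : List Int)) = true := by
    intro i hi
    rw [sub_zero, PySem.List.mem_pyRange_one] at hi
    rw [add_zero, PySem.List.slice_toNat t hi.1 hi.1]
    simp
  rw [List.filter_eq_self.mpr hcond, sub_zero]
  have : ∀ i, (i + (0:Int)) = i := fun i => add_zero i
  calc ((PySem.List.pyRange 0 (PySem.List.len t) 1).map (fun i => PySem.List.pyGetD t (i + 0) 0))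
      = (PySem.List.pyRange 0 (PySem.List.len t) 1).map (fun i => PySem.List.pyGetD t i 0) := by
        apply List.map_congr_left; intro i _; rw [add_zero]
    _ = t := PySem.List.map_pyGetD_pyRange_zero t 0

-- ===== VERDICT (by name: the statement is the Claim_ definition above) =====
theorem rule_seq_follow_count_spec : Claim_equal_rule_seq_follow_count := by
  intro p traces _
  unfold Spec_rule_seq_follow_count rule_seq_follow_count rule_seq_follow_count_alt
  simp only []
  by_cases hk : p.length = 0
  · have hp : p = [] := List.length_eq_zero_iff.mp hk
    subst hp
    rw [if_pos (by simp)]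
    congr 1
    apply PySem.List.foldl_congr_mem
    intro acc t _
    rw [pv_innerA, pv_LA_zero]
    rfl
  · rw [if_neg (by simpa using hk)]
    congr 1
    apply PySem.List.foldl_congr_mem
    intro acc t _
    rw [pv_innerA, pv_LA_eq p t (by omega)]
    have hscan := pv_scan_eq p (pvBuildFail p) (by omega) (pv_fail_getD p (by omega)) t [] acc
    rw [pv_MB_nil p (by omega)] at hscan
    rw [hscan, pv_specNexts_eq p t []]
    simp only [List.length_nil, List.nil_append, zero_add]
    rfl
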